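-- pv_equiv track=rewrite | github.com/rlawogkr/codingtest-py | jungle/03.py | solution
-- ===== SOURCE A (Python) =====
-- def solution(amountText):
--     answer = True
--     n = len(amountText)
--     if amountText[0] == ',' or amountText[-1] == ',':
--         return False
--
--     for i in range(n):
--         if not amountText[i].isdigit() and amountText[i] != ',':
--             answer = False
--             break
--     if amountText[0] == '0' and len(amountText) > 1:
--         answer = False
--     if amountText.count(',') >= 1:
--         comma_positions = range(n-4, 0, -4)
--         for pos in comma_positions:
--             if amountText[pos] != ',':
--                 answer = False
--                 break
--     return answer
-- ===== SOURCE B (Python) =====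
-- def solution(amountText):
--     if amountText[0] == ',' or amountText[-1] == ',':
--         return False
--     n = len(amountText)
--     required = list(range(n - 4, 0, -4)) if ',' in amountText else []
--     return (not (amountText[0] == '0' and n > 1)
--             and all((c.isdigit() or c == ',') and (i not in required or c == ',')
--                     for i, c in enumerate(amountText)))
-- ===== Notes on version B (the rewrite author's own statement) =====
-- stated objective: alternative
-- what changed: A's two scanning for-loops with break plus a count() scan are replaced by precomputing the required-comma-index list (only when a comma occurs) and one single pass over enumerate(s) that checks digit-or-comma and required-position-is-comma together.
-- outside the precondition, e.g. on solution(''): A raises IndexError, B raises IndexError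
import Mathlib
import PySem

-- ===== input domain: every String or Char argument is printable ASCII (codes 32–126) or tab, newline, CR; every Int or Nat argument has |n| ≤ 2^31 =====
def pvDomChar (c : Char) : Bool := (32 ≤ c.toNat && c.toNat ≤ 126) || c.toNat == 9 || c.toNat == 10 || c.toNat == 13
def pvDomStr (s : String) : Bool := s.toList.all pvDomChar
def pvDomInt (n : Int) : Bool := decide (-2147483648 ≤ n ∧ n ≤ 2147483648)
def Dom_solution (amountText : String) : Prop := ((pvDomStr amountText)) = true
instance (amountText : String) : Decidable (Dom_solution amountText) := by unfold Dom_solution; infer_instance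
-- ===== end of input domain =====

-- B replaces A's two scanning loops and count() test by one pass over enumerate(s) against a
-- precomputed required-comma-index list (objective: alternative decomposition, same cost).

-- ===== PORT A =====
-- first for-loop of A: break ⇒ return false immediately; otherwise keep answer
def pvA_loop1 (s : List Char) : List Int → Bool → Bool
  | [], answer => answer
  | i :: rest, answer =>
    if ¬ (PySem.Chars.strIsdigit [PySem.List.pyGetD s i ' ']) ∧ PySem.List.pyGetD s i ' ' ≠ ',' then
      false
    else pvA_loop1 s rest answer

-- second for-loop of A over comma_positions
def pvA_loop2 (s : List Char) : List Int → Bool → Bool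
  | [], answer => answer
  | pos :: rest, answer =>
    if PySem.List.pyGetD s pos ' ' ≠ ',' then false
    else pvA_loop2 s rest answer

-- indices 0, -1 and those produced by the two range() calls are in range whenever s ≠ []
-- (Pre_solution), so pyGetD with a dummy default is exact there
def solution (amountText : String) : Bool :=
  let s := amountText.toList
  let n : Int := PySem.List.len s
  if PySem.List.pyGetD s 0 ' ' = ',' ∨ PySem.List.pyGetD s (-1) ' ' = ',' then false
  else
    let answer := pvA_loop1 s (PySem.List.pyRange 0 n 1) true
    let answer := if PySem.List.pyGetD s 0 ' ' = '0' ∧ 1 < n then false else answer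
    let answer := if 1 ≤ PySem.Chars.count s [','] then
        pvA_loop2 s (PySem.List.pyRange (n - 4) 0 (-4)) answer
      else answer
    answer

-- ===== PORT B =====
def solution_alt (amountText : String) : Bool :=
  let s := amountText.toList
  if PySem.List.pyGetD s 0 ' ' = ',' ∨ PySem.List.pyGetD s (-1) ' ' = ',' then false
  else
    let n : Int := PySem.List.len s
    let required : List Int :=
      if PySem.Chars.isIn [','] s then PySem.List.pyRange (n - 4) 0 (-4) else []
    !(decide (PySem.List.pyGetD s 0 ' ' = '0' ∧ 1 < n)) &&
      (PySem.List.enumerate s).all (fun p =>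
        (PySem.Chars.strIsdigit [p.2] || p.2 == ',') &&
        (!(required.contains p.1) || p.2 == ','))

-- ===== PRECONDITION & SPEC =====
-- Pre_ excludes only the empty string, on which A (amountText[0]) raises IndexError
def Pre_solution (amountText : String) : Prop := amountText ≠ ""
instance (amountText : String) : Decidable (Pre_solution amountText) := by
  unfold Pre_solution; infer_instance

def pvWitness_solution : String := "1,234"

def Spec_solution (amountText : String) (out : Bool) : Prop := out = solution_alt amountText
instance (amountText : String) (out : Bool) : Decidable (Spec_solution amountText out) := by
  unfold Spec_solution; infer_instance

-- ===== CLAIM (what is proved, stated in full; the proofs are below) =====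
def Claim_equal_solution : Prop := ∀ (amountText : String), Dom_solution amountText →
  Pre_solution amountText → Spec_solution amountText (solution amountText)

-- ===== LEMMAS AND PROOFS =====

lemma pvA_loop1_eq (s : List Char) (l : List Int) (a : Bool) :
    pvA_loop1 s l a =
      (a && l.all (fun i => PySem.Chars.strIsdigit [PySem.List.pyGetD s i ' ']
        || PySem.List.pyGetD s i ' ' == ',')) := by
  induction l generalizing a with
  | nil => cases a <;> simp [pvA_loop1]
  | cons i rest ih =>
    simp only [pvA_loop1, List.all_cons]
    split_ifs with h
    · rcases h with ⟨h1, h2⟩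
      simp [h1, h2]
    · rw [ih]
      cases hd : PySem.Chars.strIsdigit [PySem.List.pyGetD s i ' '] <;>
        cases hc : PySem.List.pyGetD s i ' ' == ',' <;>
        simp_all

lemma pvA_loop2_eq (s : List Char) (l : List Int) (a : Bool) :
    pvA_loop2 s l a = (a && l.all (fun pos => PySem.List.pyGetD s pos ' ' == ',')) := by
  induction l generalizing a with
  | nil => cases a <;> simp [pvA_loop2]
  | cons pos rest ih =>
    simp only [pvA_loop2, List.all_cons]
    split_ifs with h
    · simp [h]
    · rw [ih]
      simp only [ne_eq, not_not] at h
      simp [h]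

-- count.go with a single-character needle is List.count
lemma pv_count_go_singleton (c : Char) :
    ∀ (fuel : Nat) (l : List Char) (acc : Nat), l.length ≤ fuel →
      PySem.Chars.count.go [c] fuel l acc = acc + l.count c := by
  intro fuel
  induction fuel with
  | zero =>
    intro l acc h
    have : l = [] := List.eq_nil_of_length_eq_zero (Nat.le_zero.mp h)
    subst this; simp [PySem.Chars.count.go]
  | succ f ih =>
    intro l acc h
    cases l with
    | nil => simp [PySem.Chars.count.go]
    | cons x t =>
      simp only [PySem.Chars.count.go]
      by_cases hx : x = c
      · subst hx
        have : [x].isPrefixOf (x :: t) = true := by simp [List.isPrefixOf]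
        rw [if_pos this]
        simp only [List.length_singleton, List.drop_one, List.tail_cons]
        rw [ih t (acc + 1) (by simpa using Nat.le_of_succ_le_succ h)]
        simp
        omega
      · have : [c].isPrefixOf (x :: t) = false := by
          simp [List.isPrefixOf]
          exact fun hcx => absurd hcx.symm hx
        rw [if_neg (by simp [this])]
        rw [ih t acc (by simpa using Nat.le_of_succ_le_succ h)]
        simp [hx]

lemma pv_count_singleton (s : List Char) (c : Char) :
    PySem.Chars.count s [c] = s.count c := by
  simp only [PySem.Chars.count, List.isEmpty_cons, Bool.false_eq_true, if_false]
  simpa using pv_count_go_singleton c s.length s 0 (le_refl _)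

lemma pv_comma_tests (s : List Char) :
    (1 ≤ PySem.Chars.count s [','] ↔ ',' ∈ s) ∧
      (PySem.Chars.isIn [','] s = true ↔ ',' ∈ s) := by
  constructor
  · rw [pv_count_singleton]
    exact ⟨fun h => List.count_pos_iff.mp h, fun h => List.count_pos_iff.mpr h⟩
  · rw [PySem.Chars.isIn_iff_infix]
    constructor
    · rintro ⟨pre, suf, hps⟩
      exact hps ▸ (by simp)
    · intro h
      obtain ⟨pre, suf, hps⟩ := List.append_of_mem h
      exact ⟨pre, suf, by simp [hps]⟩

-- A's first loop over range(n) scans exactly the characters of s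
lemma pv_all1_eq (s : List Char) (P : Char → Bool) :
    (PySem.List.pyRange 0 (PySem.List.len s) 1).all (fun i => P (PySem.List.pyGetD s i ' '))
      = s.all P := by
  have hmap := PySem.List.map_pyGetD_pyRange_zero (xs := s) (d := ' ')
  calc (PySem.List.pyRange 0 (PySem.List.len s) 1).all (fun i => P (PySem.List.pyGetD s i ' '))
      = ((PySem.List.pyRange 0 (PySem.List.len s) 1).map (fun i => PySem.List.pyGetD s i ' ')).all P := by
        rw [List.all_map]; rfl
    _ = s.all P := by rw [hmap]

lemma pv_all1_digit (s : List Char) :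
    (PySem.List.pyRange 0 (PySem.List.len s) 1).all (fun i =>
        PySem.Chars.strIsdigit [PySem.List.pyGetD s i ' '] || PySem.List.pyGetD s i ' ' == ',')
      = s.all (fun c => PySem.Chars.strIsdigit [c] || c == ',') := by
  exact pv_all1_eq s (fun c => PySem.Chars.strIsdigit [c] || c == ',')

-- B's single enumerate pass splits into the character test and the required-position test
lemma pv_enum_split (s : List Char) (req : List Int)
    (hreq : ∀ pos ∈ req, 0 ≤ pos ∧ pos < PySem.List.len s) :
    (PySem.List.enumerate s).all (fun p =>
        (PySem.Chars.strIsdigit [p.2] || p.2 == ',') && (!(req.contains p.1) || p.2 == ','))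
      = (s.all (fun c => PySem.Chars.strIsdigit [c] || c == ',')
          && req.all (fun pos => PySem.List.pyGetD s pos ' ' == ',')) := by
  rw [PySem.List.enumerate_eq_map_pyRange (d := ' '), List.all_map]
  simp only [Function.comp_def]
  have hsplit : ∀ l : List Int,
      l.all (fun j => (PySem.Chars.strIsdigit [PySem.List.pyGetD s j ' ']
          || PySem.List.pyGetD s j ' ' == ',')
        && (!(req.contains j) || PySem.List.pyGetD s j ' ' == ','))
      = (l.all (fun j => PySem.Chars.strIsdigit [PySem.List.pyGetD s j ' ']
          || PySem.List.pyGetD s j ' ' == ',')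
        && l.all (fun j => !(req.contains j) || PySem.List.pyGetD s j ' ' == ','))
      := by
    intro l
    induction l with
    | nil => rfl
    | cons x t ih =>
      simp only [List.all_cons, ih]
      ac_rfl
  rw [hsplit]
  congr 1
  · exact pv_all1_digit s
  -- the positional conjunct over the whole range collapses to the required positions
  · rw [Bool.eq_iff_iff]
    simp only [List.all_eq_true, Bool.or_eq_true, Bool.not_eq_eq_eq_not, Bool.not_true,
      List.contains_eq_mem, decide_eq_false_iff_not, beq_iff_eq]
    constructor
    · intro h pos hpos
      have hb := hreq pos hpos
      have hmem : pos ∈ PySem.List.pyRange 0 (PySem.List.len s) 1 := by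
        rw [PySem.List.mem_pyRange_one]; exact ⟨hb.1, hb.2⟩
      rcases h pos hmem with hnot | hc
      · exact absurd hpos hnot
      · exact hc
    · intro h j _
      by_cases hj : j ∈ req
      · exact Or.inr (h j hj)
      · exact Or.inl hj

lemma pv_range2_bounds (s : List Char) (pos : Int)
    (hpos : pos ∈ PySem.List.pyRange (PySem.List.len s - 4) 0 (-4)) :
    0 ≤ pos ∧ pos < PySem.List.len s := by
  rw [PySem.List.mem_pyRange_iff_of_neg (by norm_num)] at hpos
  omega

-- the list-level equivalence, assembled from the pieces above
lemma pv_main (s : List Char) :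
    (let n : Int := PySem.List.len s
     if PySem.List.pyGetD s 0 ' ' = ',' ∨ PySem.List.pyGetD s (-1) ' ' = ',' then false
     else
       let answer := pvA_loop1 s (PySem.List.pyRange 0 n 1) true
       let answer := if PySem.List.pyGetD s 0 ' ' = '0' ∧ 1 < n then false else answer
       if 1 ≤ PySem.Chars.count s [','] then
         pvA_loop2 s (PySem.List.pyRange (n - 4) 0 (-4)) answer
       else answer)
    = (if PySem.List.pyGetD s 0 ' ' = ',' ∨ PySem.List.pyGetD s (-1) ' ' = ',' then false
       else
         let n : Int := PySem.List.len s
         let required : List Int :=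
           if PySem.Chars.isIn [','] s then PySem.List.pyRange (n - 4) 0 (-4) else []
         !(decide (PySem.List.pyGetD s 0 ' ' = '0' ∧ 1 < n)) &&
           (PySem.List.enumerate s).all (fun p =>
             (PySem.Chars.strIsdigit [p.2] || p.2 == ',') &&
             (!(required.contains p.1) || p.2 == ','))) := by
  by_cases h0 : PySem.List.pyGetD s 0 ' ' = ',' ∨ PySem.List.pyGetD s (-1) ' ' = ','
  · simp only [h0, if_true]
  · simp only [h0, if_false]
    rw [pvA_loop1_eq, pv_all1_digit]
    by_cases hc : ',' ∈ s
    · have hcnt : 1 ≤ PySem.Chars.count s [','] := (pv_comma_tests s).1.mpr hc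
      have hin : PySem.Chars.isIn [','] s = true := (pv_comma_tests s).2.mpr hc
      simp only [hin, if_pos hcnt, if_true]
      rw [pvA_loop2_eq,
        pv_enum_split s _ (fun pos hpos => pv_range2_bounds s pos hpos)]
      by_cases hz : PySem.List.pyGetD s 0 ' ' = '0' ∧ 1 < PySem.List.len s
      · simp [hz, Bool.and_assoc]
      · simp only [hz, if_false]
        rw [Bool.and_assoc]
        simp
    · have hcnt : ¬ (1 ≤ PySem.Chars.count s [',']) :=
        fun h => hc ((pv_comma_tests s).1.mp h)
      have hin : PySem.Chars.isIn [','] s = false := by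
        cases hin : PySem.Chars.isIn [','] s
        · rfl
        · exact absurd ((pv_comma_tests s).2.mp hin) hc
      simp only [hin, if_neg hcnt, Bool.false_eq_true, if_false]
      rw [pv_enum_split s [] (by intro pos h; simp at h)]
      by_cases hz : PySem.List.pyGetD s 0 ' ' = '0' ∧ 1 < PySem.List.len s
      · simp [hz]
      · simp

-- ===== VERDICT (by name: the statement is the Claim_ definition above) =====
theorem solution_spec : Claim_equal_solution := by
  intro amountText _ _
  unfold Spec_solution solution solution_alt
  exact pv_main amountText.toList
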